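-- pv_equiv track=rewrite | github.com/kuznetsovmatweyushka/PythonLessons | HW/HW 3/5.py | negative_fib
-- ===== SOURCE A (Python) =====
-- def fib(n: int) -> int:
--     if n in [1, 2]:
--         return 1
--     else:
--         return fib(n-1) + fib(n-2)
--
-- def negative_fib(k : int) -> list:
--     #обычный ряд Фибоначчи
--     list = []
--     list.append(0)
--     for e in range(1, k + 1):
--         list.append(fib(e))
--     #копируем обычный ряд и умножаем все элементы на -1
--     negative_list = list[1:]
--     for i in range(len(negative_list)):
--         negative_list[i] *= -1
--     #добавляем в новый список положительный и отрицательный ряд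
--     negative_fib_list = []
--     for i in range(len(negative_list)):
--         negative_fib_list.append(negative_list[i])
--     for j in range(len(list)):
--         negative_fib_list.append(list[j])
--     #сортируем итоговый список
--     negative_fib_list.sort()
--     return negative_fib_list
-- ===== SOURCE B (Python) =====
-- def negative_fib(k):
--     fibs = []
--     a, b = 1, 1
--     for _ in range(k):
--         fibs.append(a)
--         a, b = b, a + b
--     return [-f for f in reversed(fibs)] + [0] + fibs
-- ===== Notes on version B (the rewrite author's own statement) =====
-- stated objective: faster
-- what changed: B computes the Fibonacci numbers with one iterative (a,b) loop instead of naive exponential recursion, and emits the negated-reversed prefix + 0 + ascending prefix directly instead of building, index-negating, concatenating and sorting lists.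
import Mathlib
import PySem

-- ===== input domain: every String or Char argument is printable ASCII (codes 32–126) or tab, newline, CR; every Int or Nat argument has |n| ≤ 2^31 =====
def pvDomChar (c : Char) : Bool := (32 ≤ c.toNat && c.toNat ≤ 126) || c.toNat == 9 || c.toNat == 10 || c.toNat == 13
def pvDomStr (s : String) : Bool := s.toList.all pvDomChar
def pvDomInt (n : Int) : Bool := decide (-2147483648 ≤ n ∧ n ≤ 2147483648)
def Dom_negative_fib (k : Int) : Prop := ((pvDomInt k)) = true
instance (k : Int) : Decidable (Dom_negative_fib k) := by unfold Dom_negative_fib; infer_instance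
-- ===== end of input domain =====

-- B replaces the exponential recursive fib and the final sort by an iterative Fibonacci
-- loop that emits the result already in order (objective: faster).

-- ===== PORT A =====
-- fib(n): Python recursion; for n ≤ 0 Python would recurse forever (never reached by
-- negative_fib, which only calls fib on 1..k) — the `n ≤ 0 → 0` branch is a totality guard only.
def fibA (n : Int) : Int :=
  if n = 1 ∨ n = 2 then 1
  else if n ≤ 0 then 0
  else fibA (n - 1) + fibA (n - 2)
termination_by n.toNat
decreasing_by all_goals omega

def negative_fib (k : Int) : List Int :=
  -- list = []; list.append(0); for e in range(1, k+1): list.append(fib(e))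
  let lst : List Int := ([] : List Int) ++ [0]
  let lst := (PySem.List.pyRange 1 (k + 1) 1).foldl (fun acc e => acc ++ [fibA e]) lst
  -- negative_list = list[1:]; for i in range(len(negative_list)): negative_list[i] *= -1
  let negative_list := PySem.List.slice lst (some 1) none
  let negative_list := (PySem.List.pyRange 0 (negative_list.length : Int) 1).foldl
      (fun acc i => PySem.List.pySetD acc i (PySem.List.pyGetD acc i 0 * (-1))) negative_list
  -- negative_fib_list = []; two append loops; then .sort()
  let nfl : List Int := []
  let nfl := (PySem.List.pyRange 0 (negative_list.length : Int) 1).foldl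
      (fun acc i => acc ++ [PySem.List.pyGetD negative_list i 0]) nfl
  let nfl := (PySem.List.pyRange 0 (lst.length : Int) 1).foldl
      (fun acc j => acc ++ [PySem.List.pyGetD lst j 0]) nfl
  PySem.List.sorted nfl (fun x => x) false

-- ===== PORT B =====
-- the loop `for _ in range(k): fibs.append(a); a, b = b, a + b` as its structural recursion
def fibsIter : Nat → Int → Int → List Int
  | 0, _, _ => []
  | Nat.succ n, a, b => a :: fibsIter n b (a + b)

def negative_fib_alt (k : Int) : List Int :=
  let fibs := fibsIter k.toNat 1 1
  fibs.reverse.map (fun f => -f) ++ [0] ++ fibs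

-- ===== PRECONDITION & SPEC =====
def Spec_negative_fib (k : Int) (out : List Int) : Prop := out = negative_fib_alt k
instance (k : Int) (out : List Int) : Decidable (Spec_negative_fib k out) := by unfold Spec_negative_fib; infer_instance

-- ===== CLAIM (what is proved, stated in full; the proofs are below) =====
def Claim_equal_negative_fib : Prop := ∀ (k : Int), Dom_negative_fib k → Spec_negative_fib k (negative_fib k)

-- ===== LEMMAS AND PROOFS =====

-- Fibonacci recurrence of the A-side helper, on the arguments negative_fib reaches
theorem fibA_add_two (m : Int) (hm : 1 ≤ m) : fibA (m + 2) = fibA m + fibA (m + 1) := by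
  rw [fibA]
  have h1 : ¬ (m + 2 = 1 ∨ m + 2 = 2) := by omega
  have h2 : ¬ (m + 2 ≤ 0) := by omega
  simp only [h1, h2, if_false]
  have e1 : m + 2 - 1 = m + 1 := by ring
  have e2 : m + 2 - 2 = m := by ring
  rw [e1, e2, add_comm]

-- A's fib values over a range are B's iterative Fibonacci list
theorem map_fibA_pyRange (n : Nat) : ∀ (m : Int), 1 ≤ m →
    (PySem.List.pyRange m (m + (n : Int)) 1).map fibA = fibsIter n (fibA m) (fibA (m + 1)) := by
  induction n with
  | zero =>
      intro m _
      rw [PySem.List.pyRange_one_eq_nil (by simp)]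
      simp [fibsIter]
  | succ n ih =>
      intro m hm
      have hlt : m < m + ((n + 1 : Nat) : Int) := by push_cast; omega
      rw [PySem.List.pyRange_one_cons hlt, List.map_cons, fibsIter]
      have harg : m + ((n + 1 : Nat) : Int) = (m + 1) + (n : Int) := by push_cast; ring
      rw [harg, ih (m + 1) (by omega)]
      have e : m + 1 + 1 = m + 2 := by ring
      rw [e, fibA_add_two m hm]

theorem set_append_len (done : List Int) (t v : Int) (ts : List Int) :
    (done ++ t :: ts).set done.length v = done ++ v :: ts := by
  induction done <;> simp [*]

theorem getD_append_len (done : List Int) (t : Int) (ts : List Int) :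
    (done ++ t :: ts).getD done.length 0 = t := by
  simp [List.getD]

-- the in-place `negative_list[i] *= -1` loop maps (* -1) over the list
theorem negloop (todo : List Int) : ∀ (done : List Int),
    (PySem.List.pyRange (done.length : Int) ((done.length : Int) + (todo.length : Int)) 1).foldl
        (fun acc i => PySem.List.pySetD acc i (PySem.List.pyGetD acc i 0 * (-1))) (done ++ todo)
      = done ++ todo.map (fun x => x * (-1)) := by
  induction todo with
  | nil =>
      intro done
      rw [PySem.List.pyRange_one_eq_nil (by simp)]
      simp
  | cons t ts ih =>
      intro done
      have hlt : (done.length : Int) < (done.length : Int) + ((t :: ts).length : Int) := by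
        push_cast [List.length_cons]; omega
      rw [PySem.List.pyRange_one_cons hlt, List.foldl_cons]
      have hstep : PySem.List.pySetD (done ++ t :: ts) (done.length : Int)
          (PySem.List.pyGetD (done ++ t :: ts) (done.length : Int) 0 * (-1))
          = (done ++ [t * (-1)]) ++ ts := by
        rw [PySem.List.pyGetD_natCast, PySem.List.pySetD_natCast, getD_append_len,
          set_append_len]
        simp
      rw [hstep]
      have h1 : (done.length : Int) + 1 = (((done ++ [t * (-1)]).length : Nat) : Int) := by
        simp
      have h2 : (done.length : Int) + ((t :: ts).length : Int)
          = (((done ++ [t * (-1)]).length : Nat) : Int) + (ts.length : Int) := by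
        simp; omega
      rw [h1, h2, ih (done ++ [t * (-1)])]
      simp

-- the element-copying append loop
theorem copyloop (xs init : List Int) :
    (PySem.List.pyRange 0 (xs.length : Int) 1).foldl
        (fun acc i => acc ++ [PySem.List.pyGetD xs i 0]) init = init ++ xs := by
  rw [PySem.List.foldl_append_singleton_eq_map, PySem.List.map_pyGetD_pyRange_zero' xs 0]

-- lower bound and monotonicity of the iterative Fibonacci list
theorem fibsIter_bounds (n : Nat) : ∀ (a b : Int), 0 < a → a ≤ b →
    (∀ x ∈ fibsIter n a b, a ≤ x) ∧ (fibsIter n a b).Pairwise (· ≤ ·) := by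
  induction n with
  | zero => intro a b _ _; simp [fibsIter]
  | succ n ih =>
      intro a b ha hab
      have hb : 0 < b := by omega
      have hbb : b ≤ a + b := by omega
      obtain ⟨ihm, ihp⟩ := ih b (a + b) hb hbb
      refine ⟨?_, ?_⟩
      · intro x hx
        rcases List.mem_cons.mp hx with rfl | h
        · exact le_refl x
        · exact le_trans hab (ihm x h)
      · exact List.Pairwise.cons (fun x hx => le_trans hab (ihm x hx)) ihp

theorem negative_fib_eq_alt (k : Int) : negative_fib k = negative_fib_alt k := by
  set F := fibsIter k.toNat 1 1 with hF
  have hfib1 : fibA 1 = 1 := by rw [fibA]; simp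
  have hfib2 : fibA (1 + 1) = 1 := by rw [fibA]; norm_num
  have hrange : (PySem.List.pyRange 1 (k + 1) 1).map fibA = F := by
    by_cases hk : k ≤ 0
    · rw [PySem.List.pyRange_one_eq_nil (by omega)]
      have hz : k.toNat = 0 := by omega
      simp [hF, hz, fibsIter]
    · have hich : k + 1 = 1 + (k.toNat : Int) := by omega
      rw [hich, map_fibA_pyRange k.toNat 1 (by omega), hfib1, hfib2, hF]
  have h1 : List.foldl (fun acc e => acc ++ [fibA e]) (([] : List Int) ++ [0])
      (PySem.List.pyRange 1 (k + 1) 1) = 0 :: F := by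
    rw [PySem.List.foldl_append_singleton_eq_map, hrange]
    simp
  have h2 : PySem.List.slice (0 :: F) (some 1) none = F := by
    rw [PySem.List.slice_from_one]; rfl
  have h3 : List.foldl (fun acc i => PySem.List.pySetD acc i (PySem.List.pyGetD acc i 0 * (-1)))
      F (PySem.List.pyRange 0 (F.length : Int) 1) = F.map (fun x => x * (-1)) := by
    have := negloop F []
    simpa using this
  unfold negative_fib
  simp only []
  rw [h1, h2, h3, copyloop (F.map (fun x => x * (-1))) [],
    copyloop (0 :: F) ([] ++ F.map (fun x => x * (-1)))]
  simp only [List.nil_append]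
  unfold negative_fib_alt
  simp only []
  rw [← hF]
  obtain ⟨hlb, hpw⟩ := fibsIter_bounds k.toNat 1 1 (by omega) (le_refl 1)
  rw [← hF] at hlb hpw
  apply PySem.List.sorted_id_eq_of_perm_of_pairwise
  · -- permutation
    have hmapeq : F.map (fun x => x * (-1)) = F.map (fun f => -f) := by
      simp
    rw [hmapeq, List.map_reverse, List.append_assoc]
    exact (List.reverse_perm (F.map (fun f => -f))).append_right ([0] ++ F)
  · -- sortedness
    rw [List.append_assoc, List.pairwise_append]
    refine ⟨?_, ?_, ?_⟩
    · rw [List.pairwise_map, List.pairwise_reverse]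
      exact hpw.imp (fun h => by omega)
    · rw [List.singleton_append, List.pairwise_cons]
      exact ⟨fun x hx => by have := hlb x hx; omega, hpw⟩
    · intro x hx y hy
      rw [List.mem_map] at hx
      obtain ⟨f, hf, rfl⟩ := hx
      have hf1 : 1 ≤ f := hlb f (List.mem_reverse.mp hf)
      rw [List.singleton_append] at hy
      rcases List.mem_cons.mp hy with rfl | hy
      · omega
      · have := hlb y hy; omega

-- ===== VERDICT (by name: the statement is the Claim_ definition above) =====
theorem negative_fib_spec : Claim_equal_negative_fib := by
  intro k _
  unfold Spec_negative_fib
  exact negative_fib_eq_alt k
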